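-- pv_equiv track=rewrite | github.com/tonylizj/python | assignment.py | tenStreak
-- ===== SOURCE A (Python) =====
-- def tenStreak(numlist):
--     """
--     In a given list, change every element after a multiple of ten to that number. When another multiple of ten is encountered, every subsequent element is changed to that number instead. Continues until the end of the list.
--     :param numlist: list - list to change.
--     :return: list - a copy of the original list with every element after a multiple of ten changed to that number.
--     """
--     # seen_multiple means a multiple of ten has been found in the list
--     seen_multiple = False
--
--     # iterates through the list
--     for i in range(len(numlist)):
--         # sets seen_multiple as True and store the number if the number is a multiple of ten
--         if numlist[i] % 10 == 0:
--             seen_multiple = True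
--             multiple = numlist[i]
--
--         # changes the number to the multiple if seen_multiple is True
--         elif seen_multiple:
--             numlist[i] = multiple
--
--     # returns the changed list
--     return numlist
-- ===== SOURCE B (Python) =====
-- def tenStreak(numlist):
--     # Two passes: collect indices of multiples of ten, then fill each
--     # inter-mark region (and the tail) with a single slice assignment.
--     marks = [i for i, x in enumerate(numlist) if x % 10 == 0]
--     for p, q in zip(marks, marks[1:] + [len(numlist)]):
--         v = numlist[p]
--         numlist[p + 1:q] = [v] * (q - p - 1)
--     return numlist
-- ===== Notes on version B (the rewrite author's own statement) =====
-- stated objective: alternative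
-- what changed: Replaces A's single index loop carrying seen_multiple/multiple state with a two-pass scheme: first collect the indices of multiples of ten, then fill each inter-mark region (and the tail) with one slice assignment per mark.
import Mathlib
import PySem

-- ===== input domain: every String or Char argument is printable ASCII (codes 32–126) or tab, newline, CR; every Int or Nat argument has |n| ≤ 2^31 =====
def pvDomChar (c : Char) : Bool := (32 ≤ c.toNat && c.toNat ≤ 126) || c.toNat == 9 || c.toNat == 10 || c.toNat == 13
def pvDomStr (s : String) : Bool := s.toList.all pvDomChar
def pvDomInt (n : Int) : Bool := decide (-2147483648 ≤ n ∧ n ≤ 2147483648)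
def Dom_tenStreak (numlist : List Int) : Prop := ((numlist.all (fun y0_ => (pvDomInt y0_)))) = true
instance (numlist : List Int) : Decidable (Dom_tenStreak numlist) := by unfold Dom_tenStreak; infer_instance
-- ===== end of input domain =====

-- B rewrites A's stateful index loop as two passes (collect mark indices, then one slice-fill per
-- inter-mark region); both mutate the list in place in Python, the equivalence is about the return value.

-- ===== PORT A =====
-- loop body of A; state = (numlist, seen_multiple/multiple as an Option); the index i is always in
-- range, so pyGetD/pySetD are exact here
def tenStreakStepA (st : List Int × Option Int) (i : Int) : List Int × Option Int :=
  let x := PySem.List.pyGetD st.1 i 0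
  if PySem.Int.mod x 10 = 0 then (st.1, some x)
  else
    match st.2 with
    | some m => (PySem.List.pySetD st.1 i m, st.2)
    | none => st

def tenStreak (numlist : List Int) : List Int :=
  ((PySem.List.pyRange 0 (numlist.length : Int) 1).foldl tenStreakStepA
    (numlist, (none : Option Int))).1

-- ===== PORT B =====
-- marks = [i for i, x in enumerate(numlist) if x % 10 == 0]
def tenStreakMarks (numlist : List Int) : List Int :=
  (PySem.List.enumerate numlist 0).filterMap
    (fun p => if PySem.Int.mod p.2 10 = 0 then some p.1 else none)

-- one slice assignment numlist[p+1:q] = [v]*(q-p-1); p,q are in range, so pyGetD is exact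
def tenStreakStepB (xs : List Int) (pq : Int × Int) : List Int :=
  let v := PySem.List.pyGetD xs pq.1 0
  PySem.List.slice xs none (some (pq.1 + 1)) ++ PySem.List.pyRepeat [v] (pq.2 - pq.1 - 1)
    ++ PySem.List.slice xs (some pq.2) none

def tenStreak_alt (numlist : List Int) : List Int :=
  let ms := tenStreakMarks numlist
  (ms.zip (PySem.List.slice ms (some 1) none ++ [(numlist.length : Int)])).foldl
    tenStreakStepB numlist

-- ===== PRECONDITION & SPEC =====
def Spec_tenStreak (numlist : List Int) (out : List Int) : Prop := out = tenStreak_alt numlist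
instance (numlist : List Int) (out : List Int) : Decidable (Spec_tenStreak numlist out) := by unfold Spec_tenStreak; infer_instance

-- ===== CLAIM (what is proved, stated in full; the proofs are below) =====
def Claim_equal_tenStreak : Prop := ∀ (numlist : List Int), Dom_tenStreak numlist → Spec_tenStreak numlist (tenStreak numlist)

-- ===== LEMMAS AND PROOFS =====

-- reference description of the result: one structural pass carrying the current multiple
def tenSG : Option Int → List Int → List Int
  | _, [] => []
  | cur, x :: xs =>
    if PySem.Int.mod x 10 = 0 then x :: tenSG (some x) xs
    else (match cur with | some v => v | none => x) :: tenSG cur xs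

-- reference description of the mark indices
def tenMS (s : Int) : List Int → List Int
  | [] => []
  | x :: xs => if PySem.Int.mod x 10 = 0 then s :: tenMS (s + 1) xs else tenMS (s + 1) xs

lemma lemA : ∀ (xs pre : List Int) (cur : Option Int),
    ((PySem.List.pyRange (pre.length : Int) ((pre.length : Int) + xs.length) 1).foldl
      tenStreakStepA (pre ++ xs, cur)).1 = pre ++ tenSG cur xs := by
  intro xs
  induction xs with
  | nil =>
    intro pre cur
    rw [PySem.List.pyRange_one_eq_nil (by simp)]
    simp [tenSG]
  | cons x xs ih =>
    intro pre cur
    rw [PySem.List.pyRange_one_cons (by push_cast [List.length_cons]; omega)]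
    have hget : PySem.List.pyGetD (pre ++ x :: xs) (pre.length : Int) 0 = x := by
      simp [PySem.List.pyGetD_natCast, List.getD]
    simp only [List.foldl_cons]
    have hlen2 : ∀ y : Int, ((pre.length : Int) + (x :: xs).length)
        = ((pre ++ [y]).length : Int) + xs.length := by
      intro y; push_cast [List.length_cons, List.length_append, List.length_nil]; omega
    by_cases hx : PySem.Int.mod x 10 = 0
    · have hs : tenStreakStepA (pre ++ x :: xs, cur) (pre.length : Int) = (pre ++ x :: xs, some x) := by
        simp only [tenStreakStepA, hget]; rw [if_pos hx]
      rw [hs]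
      have hre : pre ++ x :: xs = (pre ++ [x]) ++ xs := by simp
      have hlen : ((pre.length : Int) + 1) = ((pre ++ [x]).length : Int) := by simp
      rw [hre, hlen2 x, hlen, ih]
      simp only [tenSG]; rw [if_pos hx]; simp
    · cases cur with
      | some v =>
        have hs : tenStreakStepA (pre ++ x :: xs, some v) (pre.length : Int) = (pre ++ v :: xs, some v) := by
          simp only [tenStreakStepA, hget]; rw [if_neg hx]
          simp [PySem.List.pySetD_natCast]
        rw [hs]
        have hre : pre ++ v :: xs = (pre ++ [v]) ++ xs := by simp
        have hlen : ((pre.length : Int) + 1) = ((pre ++ [v]).length : Int) := by simp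
        rw [hre, hlen2 v, hlen, ih]
        simp only [tenSG]; rw [if_neg hx]; simp
      | none =>
        have hs : tenStreakStepA (pre ++ x :: xs, none) (pre.length : Int) = (pre ++ x :: xs, none) := by
          simp only [tenStreakStepA, hget]; rw [if_neg hx]
        rw [hs]
        have hre : pre ++ x :: xs = (pre ++ [x]) ++ xs := by simp
        have hlen : ((pre.length : Int) + 1) = ((pre ++ [x]).length : Int) := by simp
        rw [hre, hlen2 x, hlen, ih]
        simp only [tenSG]; rw [if_neg hx]; simp
-- the enumerate/filterMap comprehension computes tenMS
lemma marksPort : ∀ (xs : List Int) (s : Int),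
    (PySem.List.enumerate xs s).filterMap
      (fun p => if PySem.Int.mod p.2 10 = 0 then some p.1 else none) = tenMS s xs := by
  intro xs
  induction xs with
  | nil => intro s; simp [PySem.List.enumerate_nil, tenMS]
  | cons x xs ih =>
    intro s
    rw [PySem.List.enumerate_cons]
    by_cases hx : PySem.Int.mod x 10 = 0
    · simp only [List.filterMap_cons, tenMS]
      rw [if_pos hx, if_pos hx, ih]
    · simp only [List.filterMap_cons, tenMS]
      rw [if_neg hx, if_neg hx, ih]

lemma tenMS_append_nomark : ∀ (nm : List Int) (s : Int) (rest : List Int),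
    (∀ x ∈ nm, ¬ PySem.Int.mod x 10 = 0) →
    tenMS s (nm ++ rest) = tenMS (s + nm.length) rest := by
  intro nm
  induction nm with
  | nil => intro s rest _; simp
  | cons a nm ih =>
    intro s rest h
    simp only [List.cons_append, tenMS]
    rw [if_neg (h a (by simp)), ih (s + 1) rest (fun x hx => h x (by simp [hx]))]
    congr 1
    push_cast [List.length_cons]
    ring

lemma tenSG_none_nomark : ∀ (nm rest : List Int),
    (∀ x ∈ nm, ¬ PySem.Int.mod x 10 = 0) →
    tenSG none (nm ++ rest) = nm ++ tenSG none rest := by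
  intro nm
  induction nm with
  | nil => intro rest _; simp
  | cons a nm ih =>
    intro rest h
    simp only [List.cons_append, tenSG]
    rw [if_neg (h a (by simp)), ih rest (fun x hx => h x (by simp [hx]))]

lemma tenSG_some_nomark : ∀ (nm : List Int) (v : Int) (rest : List Int),
    (∀ x ∈ nm, ¬ PySem.Int.mod x 10 = 0) →
    tenSG (some v) (nm ++ rest) = List.replicate nm.length v ++ tenSG (some v) rest := by
  intro nm
  induction nm with
  | nil => intro v rest _; simp
  | cons a nm ih =>
    intro v rest h
    simp only [List.cons_append, tenSG, List.length_cons, List.replicate_succ]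
    rw [if_neg (h a (by simp)), ih v rest (fun x hx => h x (by simp [hx]))]

-- tenSG ignores the incoming state when the list is empty or starts with a multiple
lemma tenSG_indep (cur : Option Int) (rest : List Int)
    (h : rest = [] ∨ ∃ w ws, rest = w :: ws ∧ PySem.Int.mod w 10 = 0) :
    tenSG cur rest = tenSG none rest := by
  rcases h with h | ⟨w, ws, rfl, hw⟩
  · subst h; cases cur <;> rfl
  · simp only [tenSG]; rw [if_pos hw, if_pos hw]

-- the zip of marks with their successors peels off its head pair
lemma zipPairs_cons (p n : Int) (ms : List Int) :
    (p :: ms).zip ((p :: ms).tail ++ [n])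
      = (p, (ms ++ [n]).headD 0) :: ms.zip (ms.tail ++ [n]) := by
  cases ms <;> simp
-- one slice assignment fills the whole region between two consecutive marks
lemma stepB_fill (A : List Int) (v : Int) (mid T : List Int) :
    tenStreakStepB (A ++ v :: (mid ++ T)) ((A.length : Int), (A.length : Int) + 1 + mid.length)
      = A ++ v :: (List.replicate mid.length v ++ T) := by
  simp only [tenStreakStepB]
  have hget : PySem.List.pyGetD (A ++ v :: (mid ++ T)) (A.length : Int) 0 = v := by
    simp [PySem.List.pyGetD_natCast, List.getD]
  rw [hget]
  have h1 : (A.length : Int) + 1 = (((A ++ [v]).length : Nat) : Int) := by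
    push_cast [List.length_append, List.length_cons, List.length_nil]; ring
  have e1 : PySem.List.slice (A ++ v :: (mid ++ T)) none (some ((A.length : Int) + 1))
      = A ++ [v] := by
    rw [h1, PySem.List.slice_to_natCast]
    have : A ++ v :: (mid ++ T) = (A ++ [v]) ++ (mid ++ T) := by simp
    rw [this, List.take_left]
  have h2 : (A.length : Int) + 1 + mid.length - (A.length : Int) - 1 = (mid.length : Int) := by ring
  have e2 : PySem.List.pyRepeat [v] ((A.length : Int) + 1 + mid.length - (A.length : Int) - 1)
      = List.replicate mid.length v := by
    rw [h2, PySem.List.pyRepeat_singleton, Int.toNat_natCast]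
  have h3 : (A.length : Int) + 1 + mid.length = ((((A ++ [v]) ++ mid).length : Nat) : Int) := by
    push_cast [List.length_append, List.length_cons, List.length_nil]; ring
  have e3 : PySem.List.slice (A ++ v :: (mid ++ T)) (some ((A.length : Int) + 1 + mid.length)) none
      = T := by
    rw [h3, PySem.List.slice_from_natCast]
    have : A ++ v :: (mid ++ T) = ((A ++ [v]) ++ mid) ++ T := by simp
    rw [this, List.drop_left]
  rw [e1, e2, e3]
  simp
lemma lemB : ∀ (n : Nat) (xs : List Int), xs.length ≤ n → ∀ (pre : List Int),
    ((tenMS (pre.length : Int) xs).zip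
        ((tenMS (pre.length : Int) xs).tail ++ [((pre.length : Int) + xs.length)])).foldl
      tenStreakStepB (pre ++ xs) = pre ++ tenSG none xs := by
  intro n
  induction n with
  | zero =>
    intro xs hlen pre
    have hx : xs = [] := List.length_eq_zero_iff.mp (Nat.le_zero.mp hlen)
    subst hx
    simp [tenMS, tenSG]
  | succ n ih =>
    intro xs hlen pre
    set P : Int → Bool := fun x => !(decide (PySem.Int.mod x 10 = 0)) with hP
    have hsplit : xs.takeWhile P ++ xs.dropWhile P = xs := List.takeWhile_append_dropWhile
    set nm := xs.takeWhile P with hnmdef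
    set rest := xs.dropWhile P with hrestdef
    have hnm : ∀ x ∈ nm, ¬ PySem.Int.mod x 10 = 0 := by
      intro x hx
      have := List.mem_takeWhile_imp hx
      simpa [hP] using this
    cases hr : rest with
    | nil =>
      have hxs : xs = nm := by rw [← hsplit, hr, List.append_nil]
      have hms : tenMS (pre.length : Int) xs = [] := by
        rw [hxs]
        have := tenMS_append_nomark nm (pre.length : Int) [] hnm
        simpa using this
      rw [hms]
      simp only [List.zip_nil_left, List.foldl_nil]
      have : tenSG none xs = xs := by
        rw [hxs]
        have := tenSG_none_nomark nm [] hnm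
        simpa [tenSG] using this
      rw [this]
    | cons v rest1 =>
      have hv : PySem.Int.mod v 10 = 0 := by
        have := List.head?_dropWhile_not P xs
        rw [← hrestdef, hr] at this
        simpa [hP] using this
      set mid := rest1.takeWhile P with hmiddef
      set rest' := rest1.dropWhile P with hrest'def
      have hsplit1 : mid ++ rest' = rest1 := List.takeWhile_append_dropWhile
      have hmid : ∀ x ∈ mid, ¬ PySem.Int.mod x 10 = 0 := by
        intro x hx
        have := List.mem_takeWhile_imp hx
        simpa [hP] using this
      have hxs : xs = nm ++ v :: (mid ++ rest') := by rw [hsplit1, ← hr, hsplit]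
      -- abbreviations
      set p : Int := (pre.length : Int) + nm.length with hpdef
      set q : Int := p + 1 + mid.length with hqdef
      set nTot : Int := (pre.length : Int) + xs.length with hndef
      set ms' := tenMS (q) rest' with hms'def
      have hms : tenMS (pre.length : Int) xs = p :: ms' := by
        rw [hxs, tenMS_append_nomark nm _ _ hnm]
        simp only [tenMS]
        rw [if_pos hv, tenMS_append_nomark mid _ _ hmid]
      have hlenxs : xs.length = nm.length + 1 + mid.length + rest'.length := by
        rw [hxs]; simp [List.length_append]; omega
      have hhead : ((ms' ++ [nTot]).headD 0) = q := by
        cases hr' : rest' with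
        | nil =>
          have : ms' = [] := by rw [hms'def, hr']; rfl
          rw [this]
          simp only [List.nil_append, List.headD_cons]
          rw [hndef, hqdef, hpdef]
          have : xs.length = nm.length + 1 + mid.length := by
            rw [hlenxs, hr']; simp
          rw [this]; push_cast; ring
        | cons w ws =>
          have hw : PySem.Int.mod w 10 = 0 := by
            have := List.head?_dropWhile_not P rest1
            rw [← hrest'def, hr'] at this
            simpa [hP] using this
          have : ms' = q :: tenMS (q + 1) ws := by
            rw [hms'def, hr']
            simp only [tenMS]
            rw [if_pos hw]
          rw [this]; simp
      rw [hms, zipPairs_cons, hhead]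
      simp only [List.foldl_cons]
      -- the first slice assignment
      have hstep : tenStreakStepB (pre ++ xs) (p, q)
          = (pre ++ nm ++ v :: List.replicate mid.length v) ++ rest' := by
        have hA : p = (((pre ++ nm).length : Nat) : Int) := by
          rw [hpdef]; push_cast [List.length_append]; ring
        have hq' : q = (((pre ++ nm).length : Nat) : Int) + 1 + mid.length := by
          rw [hqdef, hA]
        have hL : pre ++ xs = (pre ++ nm) ++ v :: (mid ++ rest') := by
          rw [hxs]; simp
        rw [hL, hA, hq', stepB_fill]
        simp
      rw [hstep]
      -- apply the induction hypothesis to the suffix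
      have hlen' : rest'.length ≤ n := by
        have h1 : rest'.length ≤ rest1.length := by
          rw [hrest'def]; exact List.length_dropWhile_le _ _
        omega
      have hih := ih rest' hlen' (pre ++ nm ++ v :: List.replicate mid.length v)
      have hpre'len : (((pre ++ nm ++ v :: List.replicate mid.length v).length : Nat) : Int) = q := by
        push_cast [List.length_append, List.length_cons, List.length_replicate]
        rw [hqdef, hpdef]; ring
      have hnTot : nTot = (((pre ++ nm ++ v :: List.replicate mid.length v).length : Nat) : Int)
          + rest'.length := by
        rw [hpre'len, hndef, hqdef, hpdef, hlenxs]; push_cast; ring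
      rw [hpre'len] at hih hnTot
      rw [← hms'def, ← hnTot] at hih
      rw [hih]
      -- reassemble the right-hand side
      have hsg : tenSG none xs = nm ++ v :: (List.replicate mid.length v ++ tenSG none rest') := by
        rw [hxs, tenSG_none_nomark nm _ hnm]
        congr 1
        simp only [tenSG]
        rw [if_pos hv, tenSG_some_nomark mid v rest' hmid]
        congr 2
        apply tenSG_indep
        cases hr' : rest' with
        | nil => exact Or.inl rfl
        | cons w ws =>
          refine Or.inr ⟨w, ws, rfl, ?_⟩
          have := List.head?_dropWhile_not P rest1
          rw [← hrest'def, hr'] at this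
          simpa [hP] using this
      rw [hsg]
      simp
lemma tenStreak_eq_sg (xs : List Int) : tenStreak xs = tenSG none xs := by
  have := lemA xs [] none
  simpa [tenStreak] using this

lemma tenStreak_alt_eq_sg (xs : List Int) : tenStreak_alt xs = tenSG none xs := by
  have h := lemB xs.length xs le_rfl []
  simp only [List.length_nil, Nat.cast_zero, List.nil_append, zero_add] at h
  simp only [tenStreak_alt, tenStreakMarks]
  rw [marksPort, PySem.List.slice_from_one]
  exact h

-- ===== VERDICT (by name: the statement is the Claim_ definition above) =====
theorem tenStreak_spec : Claim_equal_tenStreak := by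
  intro numlist _
  unfold Spec_tenStreak
  rw [tenStreak_eq_sg, tenStreak_alt_eq_sg]
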